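-- pv_equiv track=rewrite | github.com/morfien101/adventofcode | 2022/18/main.py | axis_min_max
-- ===== SOURCE A (Python) =====
-- from typing import List, Mapping, Dict
--
-- def axis_min_max(
--     grid: Mapping[int, Mapping[int, Mapping[int, bool]]]
-- ) -> Dict[str, List[int]]:
--     max_x = 1
--     min_x = 1
--     max_y = 1
--     min_y = 1
--     max_z = 1
--     min_z = 1
--
--     for x in grid.keys():
--         if x < min_x:
--             min_x = x
--         elif x > max_x:
--             max_x = x
--
--         for y in grid[x].keys():
--             if y < min_y:
--                 min_y = y
--             elif y > max_y:
--                 max_y = y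
--
--             for z in grid[x][y].keys():
--                 if z < min_z:
--                     min_z = z
--                 elif z > max_z:
--                     max_z = z
--     return {
--         "x": [min_x - 1, max_x + 1],
--         "y": [min_y - 1, max_y + 1],
--         "z": [min_z - 1, max_z + 1],
--     }
-- ===== SOURCE B (Python) =====
-- from typing import List, Mapping, Dict
--
--
-- def axis_min_max(
--     grid: Mapping[int, Mapping[int, Mapping[int, bool]]]
-- ) -> Dict[str, List[int]]:
--     # Flatten each axis into one collection, then reduce with builtin min/max.
--     # 1 is seeded into each collection because the padded box always contains it.
--     xs = list(grid.keys())
--     ys = [y for x in grid for y in grid[x]]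
--     zs = [z for x in grid for y in grid[x] for z in grid[x][y]]
--     return {
--         name: [min([1, *ks]) - 1, max([1, *ks]) + 1]
--         for name, ks in (("x", xs), ("y", ys), ("z", zs))
--     }
-- ===== Notes on version B (the rewrite author's own statement) =====
-- stated objective: simpler
-- what changed: Replaces A's single interleaved nested loop with six hand-maintained min/max accumulators and if/elif updates by flattening each axis into one collection and reducing it with builtin min/max over the collection seeded with 1.
import Mathlib
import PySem

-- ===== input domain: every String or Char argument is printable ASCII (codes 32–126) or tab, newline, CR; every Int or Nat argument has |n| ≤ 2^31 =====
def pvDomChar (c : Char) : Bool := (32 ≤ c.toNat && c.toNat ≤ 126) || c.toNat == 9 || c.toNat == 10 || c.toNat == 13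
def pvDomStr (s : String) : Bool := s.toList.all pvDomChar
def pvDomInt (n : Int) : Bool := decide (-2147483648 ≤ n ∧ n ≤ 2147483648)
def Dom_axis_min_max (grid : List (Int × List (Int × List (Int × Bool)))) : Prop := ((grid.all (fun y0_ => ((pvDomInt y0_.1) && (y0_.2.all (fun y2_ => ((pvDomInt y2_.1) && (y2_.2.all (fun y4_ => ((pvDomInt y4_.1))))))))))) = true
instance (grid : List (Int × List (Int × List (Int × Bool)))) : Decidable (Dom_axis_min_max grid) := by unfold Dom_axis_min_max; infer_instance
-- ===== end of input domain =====

-- B trades A's interleaved nested pass with six if/elif-maintained accumulators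
-- for per-axis flattening plus builtin min/max reductions (same cost, simpler).

-- ===== PORT A =====
-- the Python 'if v < min: min = v elif v > max: max = v' update of one (min, max) pair
def pvStepMM (s : Int × Int) (v : Int) : Int × Int :=
  if v < s.1 then (v, s.2) else if v > s.2 then (s.1, v) else s

def pvFoldZ (zs : List (Int × Bool)) (sz : Int × Int) : Int × Int :=
  zs.foldl (fun sz q => pvStepMM sz q.1) sz

def pvFoldY (ys : List (Int × List (Int × Bool))) (sy sz : Int × Int) :
    (Int × Int) × (Int × Int) :=
  ys.foldl (fun s p => (pvStepMM s.1 p.1, pvFoldZ p.2 s.2)) (sy, sz)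

def axis_min_max (grid : List (Int × List (Int × List (Int × Bool)))) : List (String × List Int) :=
  let s := grid.foldl
    (fun (s : (Int × Int) × (Int × Int) × (Int × Int)) p =>
      (pvStepMM s.1 p.1, pvFoldY p.2 s.2.1 s.2.2))
    ((1, 1), (1, 1), (1, 1))
  [("x", [s.1.1 - 1, s.1.2 + 1]),
   ("y", [s.2.1.1 - 1, s.2.1.2 + 1]),
   ("z", [s.2.2.1 - 1, s.2.2.2 + 1])]

-- ===== PORT B =====
-- min([1, *ks]) and max([1, *ks]) (Python's min/max of a list is a left fold)
def pvMinSeed (ks : List Int) : Int := ks.foldl min 1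
def pvMaxSeed (ks : List Int) : Int := ks.foldl max 1

def axis_min_max_alt (grid : List (Int × List (Int × List (Int × Bool)))) : List (String × List Int) :=
  let xs := grid.map (·.1)
  let ys := grid.flatMap (fun p => p.2.map (·.1))
  let zs := grid.flatMap (fun p => p.2.flatMap (fun q => q.2.map (·.1)))
  [xs, ys, zs].zip ["x", "y", "z"] |>.map
    (fun nk => (nk.2, [pvMinSeed nk.1 - 1, pvMaxSeed nk.1 + 1]))

-- ===== PRECONDITION & SPEC =====
def Spec_axis_min_max (grid : List (Int × List (Int × List (Int × Bool)))) (out : List (String × List Int)) : Prop := out = axis_min_max_alt grid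
instance (grid : List (Int × List (Int × List (Int × Bool)))) (out : List (String × List Int)) : Decidable (Spec_axis_min_max grid out) := by unfold Spec_axis_min_max; infer_instance

-- ===== CLAIM (what is proved, stated in full; the proofs are below) =====
def Claim_equal_axis_min_max : Prop := ∀ (grid : List (Int × List (Int × List (Int × Bool)))), Dom_axis_min_max grid → Spec_axis_min_max grid (axis_min_max grid)

-- ===== LEMMAS AND PROOFS =====

theorem pvStepMM_eq (mn mx v : Int) (h : mn ≤ mx) :
    pvStepMM (mn, mx) v = (min mn v, max mx v) := by
  simp only [pvStepMM]
  split_ifs <;> simp_all <;> omega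

theorem foldl_le_init {α : Type} (f : Int → α → Int) (h : ∀ s x, f s x ≤ s) :
    ∀ (xs : List α) (a : Int), xs.foldl f a ≤ a := by
  intro xs
  induction xs with
  | nil => simp
  | cons x xs ih => intro a; exact le_trans (ih (f a x)) (h a x)

theorem le_foldl_init {α : Type} (f : Int → α → Int) (h : ∀ s x, s ≤ f s x) :
    ∀ (xs : List α) (a : Int), a ≤ xs.foldl f a := by
  intro xs
  induction xs with
  | nil => simp
  | cons x xs ih => intro a; exact le_trans (h a x) (ih (f a x))

theorem pvFoldZ_eq (zs : List (Int × Bool)) :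
    ∀ mn mx : Int, mn ≤ mx →
      pvFoldZ zs (mn, mx) =
        (zs.foldl (fun a q => min a q.1) mn, zs.foldl (fun a q => max a q.1) mx) := by
  induction zs with
  | nil => intro mn mx _; rfl
  | cons z zs ih =>
      intro mn mx h
      simp only [pvFoldZ, List.foldl_cons] at *
      rw [pvStepMM_eq mn mx z.1 h]
      exact ih _ _ (le_trans (min_le_left _ _) (le_trans h (le_max_left _ _)))

theorem pvFoldY_eq (ys : List (Int × List (Int × Bool))) :
    ∀ mny mxy mnz mxz : Int, mny ≤ mxy → mnz ≤ mxz →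
      pvFoldY ys (mny, mxy) (mnz, mxz) =
        ((ys.foldl (fun a p => min a p.1) mny, ys.foldl (fun a p => max a p.1) mxy),
         (ys.foldl (fun a p => p.2.foldl (fun b q => min b q.1) a) mnz,
          ys.foldl (fun a p => p.2.foldl (fun b q => max b q.1) a) mxz)) := by
  induction ys with
  | nil => intro _ _ _ _ _ _; rfl
  | cons y ys ih =>
      intro mny mxy mnz mxz hy hz
      simp only [pvFoldY, List.foldl_cons] at *
      rw [pvStepMM_eq mny mxy y.1 hy, pvFoldZ_eq y.2 mnz mxz hz]
      exact ih _ _ _ _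
        (le_trans (min_le_left _ _) (le_trans hy (le_max_left _ _)))
        (le_trans (foldl_le_init _ (fun s x => min_le_left _ _) _ _)
          (le_trans hz (le_foldl_init _ (fun s x => le_max_left _ _) _ _)))

-- the six accumulators of A's outer loop, as independent folds
theorem axis_fold_eq (grid : List (Int × List (Int × List (Int × Bool)))) :
    ∀ a b c d e f : Int, a ≤ b → c ≤ d → e ≤ f →
      grid.foldl
        (fun (s : (Int × Int) × (Int × Int) × (Int × Int)) p =>
          (pvStepMM s.1 p.1, pvFoldY p.2 s.2.1 s.2.2)) ((a, b), (c, d), (e, f)) =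
      ((grid.foldl (fun s p => min s p.1) a, grid.foldl (fun s p => max s p.1) b),
       (grid.foldl (fun s p => p.2.foldl (fun t q => min t q.1) s) c,
        grid.foldl (fun s p => p.2.foldl (fun t q => max t q.1) s) d),
       (grid.foldl (fun s p => p.2.foldl (fun t q => q.2.foldl (fun u r => min u r.1) t) s) e,
        grid.foldl (fun s p => p.2.foldl (fun t q => q.2.foldl (fun u r => max u r.1) t) s) f)) := by
  induction grid with
  | nil => intro _ _ _ _ _ _ _ _ _; rfl
  | cons g gs ih =>
      intro a b c d e f hab hcd hef
      simp only [List.foldl_cons]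
      rw [pvStepMM_eq a b g.1 hab, pvFoldY_eq g.2 c d e f hcd hef]
      have hmin : ∀ (α : Type) (zs : List α) (fm : Int → α → Int)
          (h1 : ∀ s x, fm s x ≤ s) (fM : Int → α → Int) (h2 : ∀ s x, s ≤ fM s x)
          (u v : Int), u ≤ v → zs.foldl fm u ≤ zs.foldl fM v :=
        fun α zs fm h1 fM h2 u v huv =>
          le_trans (foldl_le_init fm h1 zs u)
            (le_trans huv (le_foldl_init fM h2 zs v))
      exact ih _ _ _ _ _ _
        (le_trans (min_le_left _ _) (le_trans hab (le_max_left _ _)))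
        (hmin _ g.2 _ (fun s x => min_le_left _ _) _ (fun s x => le_max_left _ _) c d hcd)
        (hmin _ g.2 _
          (fun s x => foldl_le_init _ (fun t y => min_le_left _ _) _ _) _
          (fun s x => le_foldl_init _ (fun t y => le_max_left _ _) _ _) e f hef)

theorem foldl_flatMap' {α β : Type} (g : α → List β) (f : Int → β → Int) :
    ∀ (l : List α) (a : Int),
      (l.flatMap g).foldl f a = l.foldl (fun s x => (g x).foldl f s) a := by
  intro l
  induction l with
  | nil => intro a; rfl
  | cons x xs ih => intro a; simp [List.flatMap_cons, List.foldl_append, ih]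

-- ===== VERDICT (by name: the statement is the Claim_ definition above) =====
theorem axis_min_max_spec : Claim_equal_axis_min_max := by
  intro grid _
  show axis_min_max grid = axis_min_max_alt grid
  simp only [axis_min_max, axis_min_max_alt,
    axis_fold_eq grid 1 1 1 1 1 1 le_rfl le_rfl le_rfl,
    pvMinSeed, pvMaxSeed, foldl_flatMap', List.foldl_map, List.zip, List.zipWith,
    List.map_cons, List.map_nil]
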